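-- pv_equiv track=rewrite | github.com/anang0g0/Chaos_Based_Hash | mat.py | xorshift32_test
-- ===== SOURCE A (Python) =====
-- N = 32
--
-- def arr_mul(a, b):
--     n = [0 for i in range(N)]
--     for i in range(N):
--         for k in range(N):
--             n[i] = (n[i] ^ (((a[i] >>  k) & 1) * b[k]))
--     return n
--
-- def arr_pow(m, a):
--     if a == 0:
--         return [1 << i for i in range(N)]
--     r = arr_pow(m, a//2)
--     r = arr_mul(r, r)
--     return arr_mul(r, m) if a%2==1 else r
--
-- def xorshift_l(a):
--     return [(1 << i) | ((1<<(i+a)) if 0 <= i+a < N else 0) for i in range(N)]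
--
-- def xorshift_r(a):
--     return xorshift_l(-a)
--
-- def factors(n):
--     a = []
--     i = 2
--     while i*i <= n:
--         if n%i == 0:
--             a.append(i)
--             n //= i
--         else:
--             i += 1
--     a.append(n)
--     return a
--
-- def xorshift32_test(a, b, c):
--     t = arr_mul(arr_mul(xorshift_l(a), xorshift_r(b)), xorshift_l(c))
--     I = [1 << i for i in range(N)]
--     if arr_pow(t, 2**N-1) != I:
--         return False
--     for a in factors(2**N-1):
--         if arr_pow(t, (2**N-1)//a) == I:
--             return False
--     return True
-- ===== SOURCE B (Python) =====
-- N = 32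
--
-- # prime factorization of 2**32 - 1 (the five known Fermat primes); fixed, so no trial division needed
-- FACTORS = (3, 5, 17, 257, 65537)
--
-- def arr_mul(a, b):
--     out = []
--     for row in a:
--         acc = 0
--         for k, bk in enumerate(b):
--             if (row >> k) & 1:
--                 acc ^= bk
--         out.append(acc)
--     return out
--
-- def arr_pow(m, e):
--     # iterative MSB-first square-and-multiply over the binary digits of e
--     r = [1 << i for i in range(N)]
--     for d in bin(e)[2:]:
--         r = arr_mul(r, r)
--         if d == '1':
--             r = arr_mul(r, m)
--     return r
--
-- def xorshift_l(a):
--     return [(1 << i) | ((1 << (i + a)) if 0 <= i + a < N else 0) for i in range(N)]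
--
-- def xorshift_r(a):
--     return xorshift_l(-a)
--
-- def xorshift32_test(a, b, c):
--     t = arr_mul(arr_mul(xorshift_l(a), xorshift_r(b)), xorshift_l(c))
--     I = [1 << i for i in range(N)]
--     full = 2 ** N - 1
--     return arr_pow(t, full) == I and all(arr_pow(t, full // p) != I for p in FACTORS)
-- ===== Notes on version B (the rewrite author's own statement) =====
-- stated objective: alternative
-- what changed: arr_pow becomes an iterative MSB-first square-and-multiply loop over the binary digits of the exponent instead of recursion, arr_mul builds each output row directly by xor-accumulating over enumerate(b) instead of mutating a zero matrix in place, and the trial-division factors() is replaced by the fixed prime factorization [3,5,17,257,65537] of 2**32-1.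
import Mathlib
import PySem

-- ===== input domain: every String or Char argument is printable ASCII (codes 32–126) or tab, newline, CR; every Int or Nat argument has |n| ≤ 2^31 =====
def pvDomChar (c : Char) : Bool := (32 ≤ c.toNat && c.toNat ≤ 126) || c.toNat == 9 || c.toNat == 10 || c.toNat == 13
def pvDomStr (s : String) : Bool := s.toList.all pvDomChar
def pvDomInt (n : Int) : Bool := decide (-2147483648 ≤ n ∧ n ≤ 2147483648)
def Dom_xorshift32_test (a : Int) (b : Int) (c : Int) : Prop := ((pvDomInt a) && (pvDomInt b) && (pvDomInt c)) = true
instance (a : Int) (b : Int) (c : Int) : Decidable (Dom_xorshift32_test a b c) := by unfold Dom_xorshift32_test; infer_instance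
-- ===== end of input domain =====

-- B replaces the recursive square-and-multiply by an iterative MSB-first loop over the binary
-- digits of the exponent, builds each product row directly (enumerate + xor-accumulate) instead
-- of mutating a zero matrix, and uses the fixed prime factorization of 2^32-1 instead of trial
-- division (objective: alternative decomposition).
-- All integer values inside the algorithm (matrix rows, exponents) are nonnegative in Python,
-- so the ports carry them as Nat; list indexing a[i]/b[k]/n[i] is always in range (length-32
-- matrices, indices from range(32)), so getD is exact.

-- ===== PORT A =====
-- arr_mul: n = zero list; n[i] ^= ((a[i]>>k)&1) * b[k] over i,k in range(32)
def arrMulA (a b : List Nat) : List Nat :=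
  (List.range 32).foldl (fun n i =>
    (List.range 32).foldl (fun n k =>
      n.set i ((n.getD i 0) ^^^ ((((a.getD i 0) >>> k) &&& 1) * (b.getD k 0)))) n)
    (List.replicate 32 0)

-- arr_pow: recursive square-and-multiply, identity at exponent 0
def arrPowA (m : List Nat) (e : Nat) : List Nat :=
  if _h : e = 0 then (List.range 32).map (fun i => 1 <<< i)
  else
    let r := arrPowA m (e / 2)
    let r2 := arrMulA r r
    if e % 2 = 1 then arrMulA r2 m else r2
decreasing_by exact Nat.div_lt_self (Nat.pos_of_ne_zero _h) (by decide)

-- xorshift_l / xorshift_r (shared verbatim by both Python versions)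
def xorshiftL (a : Int) : List Nat :=
  (List.range 32).map (fun i =>
    (1 <<< i) ||| (if 0 ≤ (i : Int) + a ∧ (i : Int) + a < 32 then 1 <<< ((i : Int) + a).toNat else 0))

def xorshiftR (a : Int) : List Nat := xorshiftL (-a)

-- factors: trial division while loop; fuel bounds the iteration count (the only call,
-- n = 2^32-1, runs fewer than 300 iterations, far below the fuel)
def factorsGo : Nat → Nat → Nat → List Nat → List Nat
  | 0, _, n, acc => acc ++ [n]
  | fuel + 1, i, n, acc =>
    if i * i ≤ n then
      if n % i = 0 then factorsGo fuel i (n / i) (acc ++ [i])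
      else factorsGo fuel (i + 1) n acc
    else acc ++ [n]

def factorsA (n : Nat) : List Nat := factorsGo 4096 2 n []

def xorshift32_test (a : Int) (b : Int) (c : Int) : Bool :=
  let t := arrMulA (arrMulA (xorshiftL a) (xorshiftR b)) (xorshiftL c)
  let I := (List.range 32).map (fun i => 1 <<< i)
  if arrPowA t (2 ^ 32 - 1) ≠ I then false
  else if (factorsA (2 ^ 32 - 1)).any (fun p => arrPowA t ((2 ^ 32 - 1) / p) = I) then false
  else true

-- ===== PORT B =====
-- arr_mul: build each output row by xor-accumulating b[k] over enumerate(b) where bit k of the row is set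
def arrMulB (a b : List Nat) : List Nat :=
  a.map (fun row =>
    (b.zipIdx).foldl (fun acc p => if (row >>> p.2) &&& 1 ≠ 0 then acc ^^^ p.1 else acc) 0)

-- bin(e)[2:] as a list of Bool digits, MSB first ('1' ↦ true); bin(0)[2:] = "0"
def pyBinDigits : Nat → List Bool
  | 0 => []
  | e + 1 => pyBinDigits ((e + 1) / 2) ++ [decide ((e + 1) % 2 = 1)]
decreasing_by exact Nat.div_lt_self (Nat.succ_pos _) (by decide)

def binStr (e : Nat) : List Bool := if e = 0 then [false] else pyBinDigits e

-- arr_pow: iterative MSB-first square-and-multiply over the binary digits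
def arrPowB (m : List Nat) (e : Nat) : List Nat :=
  (binStr e).foldl (fun r d =>
      let r2 := arrMulB r r
      if d then arrMulB r2 m else r2)
    ((List.range 32).map (fun i => 1 <<< i))

def xorshift32_test_alt (a : Int) (b : Int) (c : Int) : Bool :=
  let t := arrMulB (arrMulB (xorshiftL a) (xorshiftR b)) (xorshiftL c)
  let I := (List.range 32).map (fun i => 1 <<< i)
  decide (arrPowB t 4294967295 = I)
    && [3, 5, 17, 257, 65537].all (fun p => arrPowB t (4294967295 / p) ≠ I)

-- ===== PRECONDITION & SPEC =====
def Spec_xorshift32_test (a : Int) (b : Int) (c : Int) (out : Bool) : Prop := out = xorshift32_test_alt a b c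
instance (a : Int) (b : Int) (c : Int) (out : Bool) : Decidable (Spec_xorshift32_test a b c out) := by unfold Spec_xorshift32_test; infer_instance

-- ===== CLAIM (what is proved, stated in full; the proofs are below) =====
def Claim_equal_xorshift32_test : Prop := ∀ (a : Int) (b : Int) (c : Int), Dom_xorshift32_test a b c → Spec_xorshift32_test a b c (xorshift32_test a b c)

-- ===== LEMMAS AND PROOFS =====

theorem length_arrMulB (a b : List Nat) : (arrMulB a b).length = a.length := by
  simp [arrMulB]

-- a map over a list as a map over its indices
theorem map_eq_map_range {α β : Type} (l : List α) (d : α) (f : α → β) :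
    l.map f = (List.range l.length).map (fun i => f (l.getD i d)) := by
  induction l with
  | nil => simp
  | cons x xs ih =>
    simp [List.range_succ_eq_map, List.map_map]
    exact ih

-- B's inner fold over enumerate(b) equals A's xor-accumulation over indices
theorem innerB_gen (row : Nat) (b : List Nat) : ∀ (j acc : Nat),
    (b.zipIdx j).foldl (fun acc p => if (row >>> p.2) &&& 1 ≠ 0 then acc ^^^ p.1 else acc) acc
      = (List.range b.length).foldl (fun acc k => acc ^^^ (((row >>> (j + k)) &&& 1) * (b.getD k 0))) acc := by
  induction b with
  | nil => simp
  | cons bk rest ih =>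
    intro j acc
    have hbit : (row >>> j) &&& 1 = 0 ∨ (row >>> j) &&& 1 = 1 := by
      rw [Nat.and_one_is_mod]; omega
    simp only [List.zipIdx_cons, List.foldl_cons, List.length_cons, List.range_succ_eq_map,
      List.foldl_map]
    rw [ih]
    have hstep : (if (row >>> j) &&& 1 ≠ 0 then acc ^^^ bk else acc)
        = acc ^^^ (((row >>> (j + 0)) &&& 1) * ((bk :: rest).getD 0 0)) := by
      rcases hbit with h | h <;> simp [h]
    rw [hstep]
    congr 1
    funext a k
    have h1 : j + (k + 1) = (j + 1) + k := by omega
    simp [h1]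

-- A's inner loop only rewrites position i
theorem innerA_set (ks : List Nat) (f : Nat → Nat) :
    ∀ (n : List Nat) (i : Nat), i < n.length →
    ks.foldl (fun n k => n.set i ((n.getD i 0) ^^^ f k)) n
      = n.set i (ks.foldl (fun acc k => acc ^^^ f k) (n.getD i 0)) := by
  induction ks with
  | nil => intro n i hi; simp [List.getD, List.getElem?_eq_getElem hi]
  | cons k ks ih =>
    intro n i hi
    rw [List.foldl_cons, ih _ i (by simp [hi]), List.set_set, List.foldl_cons]
    congr 1
    simp [List.getD, List.getElem?_set_self hi]

-- A's outer loop over the zero matrix builds the rows one by one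
theorem outerA (g : Nat → Nat → Nat) :
    ∀ (n : Nat), n ≤ 32 →
    (List.range n).foldl (fun s i =>
        (List.range 32).foldl (fun s k => s.set i ((s.getD i 0) ^^^ g i k)) s)
      (List.replicate 32 0)
    = (List.range n).map (fun i => (List.range 32).foldl (fun acc k => acc ^^^ g i k) 0)
        ++ List.replicate (32 - n) 0 := by
  intro n
  induction n with
  | zero => simp
  | succ n ih =>
    intro hn
    have hn' : n ≤ 32 := by omega
    rw [show List.range (n+1) = List.range n ++ [n] from List.range_succ, List.foldl_append,
      ih hn', List.map_append, List.foldl_cons, List.foldl_nil]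
    have hlenmap : ((List.range n).map (fun i => (List.range 32).foldl (fun acc k => acc ^^^ g i k) 0)).length = n := by simp
    have hlen : ((List.range n).map (fun i => (List.range 32).foldl (fun acc k => acc ^^^ g i k) 0)
        ++ List.replicate (32 - n) 0).length = 32 := by simp; omega
    rw [innerA_set _ _ _ n (by rw [hlen]; omega)]
    have hrep : List.replicate (32 - n) (0:Nat) = 0 :: List.replicate (32 - (n+1)) 0 := by
      have : 32 - n = (32 - (n+1)) + 1 := by omega
      rw [this, List.replicate_succ]
    have hgetD : ((List.range n).map (fun i => (List.range 32).foldl (fun acc k => acc ^^^ g i k) 0)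
        ++ List.replicate (32 - n) 0).getD n 0 = 0 := by
      rw [List.getD_append_right _ _ _ _ (by rw [hlenmap])]
      simp [hlenmap, hrep]
    rw [hgetD, List.set_append_right _ _ (by rw [hlenmap]), hlenmap]
    rw [hrep]
    simp

theorem arrMulA_eq_arrMulB (a b : List Nat) (ha : a.length = 32) (hb : b.length = 32) :
    arrMulA a b = arrMulB a b := by
  unfold arrMulA arrMulB
  rw [outerA _ 32 (le_refl 32)]
  rw [map_eq_map_range a 0, ha]
  simp only [Nat.sub_self, List.replicate_zero, List.append_nil]
  congr 1
  funext i
  rw [innerB_gen (a.getD i 0) b 0 0, hb]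
  simp

theorem length_powFoldB (m : List Nat) (l : List Bool) :
    ∀ (r : List Nat),
    (l.foldl (fun r d => let r2 := arrMulB r r; if d then arrMulB r2 m else r2) r).length
      = r.length := by
  induction l with
  | nil => intro r; rfl
  | cons d l ih =>
    intro r
    rw [List.foldl_cons, ih]
    cases d <;> simp [length_arrMulB]

theorem arrPowA_eq_foldB (e : Nat) (m : List Nat) (hm : m.length = 32) :
    arrPowA m e = (pyBinDigits e).foldl
      (fun r d => let r2 := arrMulB r r; if d then arrMulB r2 m else r2)
      ((List.range 32).map (fun i => 1 <<< i)) := by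
  induction e using Nat.strong_induction_on with
  | _ e ih =>
    match e with
    | 0 => rw [arrPowA, pyBinDigits]; simp
    | Nat.succ n =>
      rw [arrPowA, pyBinDigits, List.foldl_append, List.foldl_cons, List.foldl_nil]
      rw [← ih ((n+1)/2) (Nat.div_lt_self (Nat.succ_pos n) (by decide))]
      have hlr : (arrPowA m ((n+1)/2)).length = 32 := by
        rw [ih ((n+1)/2) (Nat.div_lt_self (Nat.succ_pos n) (by decide)), length_powFoldB]
        simp
      simp only [dif_neg (Nat.succ_ne_zero n)]
      have h2 : arrMulA (arrPowA m ((n+1)/2)) (arrPowA m ((n+1)/2))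
          = arrMulB (arrPowA m ((n+1)/2)) (arrPowA m ((n+1)/2)) :=
        arrMulA_eq_arrMulB _ _ hlr hlr
      have hlr2 : (arrMulB (arrPowA m ((n+1)/2)) (arrPowA m ((n+1)/2))).length = 32 := by
        rw [length_arrMulB]; exact hlr
      by_cases hodd : (n+1) % 2 = 1 <;>
        simp [hodd, h2, arrMulA_eq_arrMulB _ _ hlr2 hm]

theorem arrPowA_eq_arrPowB (e : Nat) (m : List Nat) (hm : m.length = 32) :
    arrPowA m e = arrPowB m e := by
  unfold arrPowB binStr
  by_cases he : e = 0
  · subst he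
    have hB : (if (0:Nat) = 0 then [false] else pyBinDigits 0).foldl
        (fun r d => let r2 := arrMulB r r; if d then arrMulB r2 m else r2)
        ((List.range 32).map (fun i => 1 <<< i))
        = arrMulB ((List.range 32).map (fun i => 1 <<< i))
            ((List.range 32).map (fun i => 1 <<< i)) := by
      simp
    rw [hB, arrPowA]
    exact (show ((List.range 32).map (fun i => 1 <<< i))
      = arrMulB ((List.range 32).map (fun i => 1 <<< i))
          ((List.range 32).map (fun i => 1 <<< i)) by decide)
  · rw [if_neg he, arrPowA_eq_foldB e m hm]

theorem length_xorshiftL (a : Int) : (xorshiftL a).length = 32 := by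
  simp [xorshiftL]

set_option maxRecDepth 10000 in
theorem factorsA_value : factorsA (2 ^ 32 - 1) = [3, 5, 17, 257, 65537] := by decide

-- ===== VERDICT (by name: the statement is the Claim_ definition above) =====
theorem xorshift32_test_spec : Claim_equal_xorshift32_test := by
  intro a b c _
  unfold Spec_xorshift32_test
  simp only [xorshift32_test, xorshift32_test_alt]
  have h1 : arrMulA (xorshiftL a) (xorshiftR b) = arrMulB (xorshiftL a) (xorshiftR b) :=
    arrMulA_eq_arrMulB _ _ (length_xorshiftL a) (length_xorshiftL (-b))
  have hl1 : (arrMulB (xorshiftL a) (xorshiftR b)).length = 32 := by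
    rw [length_arrMulB]; exact length_xorshiftL a
  have h2 : arrMulA (arrMulB (xorshiftL a) (xorshiftR b)) (xorshiftL c)
      = arrMulB (arrMulB (xorshiftL a) (xorshiftR b)) (xorshiftL c) :=
    arrMulA_eq_arrMulB _ _ hl1 (length_xorshiftL c)
  have hlt : (arrMulB (arrMulB (xorshiftL a) (xorshiftR b)) (xorshiftL c)).length = 32 := by
    rw [length_arrMulB]; exact hl1
  rw [h1, h2]
  have hp : ∀ e, arrPowA (arrMulB (arrMulB (xorshiftL a) (xorshiftR b)) (xorshiftL c)) e
      = arrPowB (arrMulB (arrMulB (xorshiftL a) (xorshiftR b)) (xorshiftL c)) e :=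
    fun e => arrPowA_eq_arrPowB e _ hlt
  rw [factorsA_value]
  have hM : (2 ^ 32 - 1 : Nat) = 4294967295 := by norm_num
  rw [hM]
  simp only [hp]
  set u := arrPowB (arrMulB (arrMulB (xorshiftL a) (xorshiftR b)) (xorshiftL c)) with hu
  by_cases e0 : u 4294967295 = (List.range 32).map (fun i => 1 <<< i)
  · by_cases e1 : u (4294967295 / 3) = (List.range 32).map (fun i => 1 <<< i) <;>
    by_cases e2 : u (4294967295 / 5) = (List.range 32).map (fun i => 1 <<< i) <;>
    by_cases e3 : u (4294967295 / 17) = (List.range 32).map (fun i => 1 <<< i) <;>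
    by_cases e4 : u (4294967295 / 257) = (List.range 32).map (fun i => 1 <<< i) <;>
    by_cases e5 : u (4294967295 / 65537) = (List.range 32).map (fun i => 1 <<< i) <;>
    simp [e0, e1, e2, e3, e4, e5]
  · simp [e0]
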